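-- pv_equiv track=rewrite | github.com/annakvach/python_bioinf_2021 | generator.py | generate
-- ===== SOURCE A (Python) =====
-- import itertools as it
--
-- def generate(l):
--     x = []
--     y = []
--     for i in range(1, l + 1):
--         x = it.chain(x, it.combinations_with_replacement('ATGC', i))
--         for j in x:
--             y.append(''.join(j))
--     return y
-- ===== SOURCE B (Python) =====
-- def generate(l):
--     # Incremental generation: each level extends the previous level's
--     # (string, last_index) pairs with the characters of index >= last_index.
--     alpha = 'ATGC'
--     res = []
--     prev = [('', 0)]
--     for _ in range(l):
--         cur = [(s + alpha[k], k) for s, start in prev for k in range(start, 4)]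
--         res += [t[0] for t in cur]
--         prev = cur
--     return res
-- ===== Notes on version B (the rewrite author's own statement) =====
-- stated objective: alternative
-- what changed: Replaces the per-length itertools.combinations_with_replacement calls (and the accidental chain/iterator-exhaustion dance) by an explicit level-by-level construction that extends each (string, last_index) pair of the previous length with every alphabet index >= last_index.
import Mathlib
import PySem

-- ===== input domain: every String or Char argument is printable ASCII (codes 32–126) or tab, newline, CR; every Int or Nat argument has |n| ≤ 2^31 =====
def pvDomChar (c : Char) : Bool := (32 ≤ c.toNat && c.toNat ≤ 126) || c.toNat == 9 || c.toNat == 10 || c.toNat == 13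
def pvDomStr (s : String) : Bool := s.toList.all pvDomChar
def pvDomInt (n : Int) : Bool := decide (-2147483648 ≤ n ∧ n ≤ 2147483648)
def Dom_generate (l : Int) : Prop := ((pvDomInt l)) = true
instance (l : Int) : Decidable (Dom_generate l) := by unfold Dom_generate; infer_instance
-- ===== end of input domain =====

-- B replaces the per-length itertools.combinations_with_replacement calls by an explicit
-- level-by-level extension of (string, last_index) pairs (objective: alternative, same cost).

-- ===== PORT A =====
-- the pool 'ATGC' as a list of characters
def pvAlpha : List Char := ['A', 'T', 'G', 'C']
def pvChr (k : Nat) : Char := pvAlpha.getD k 'A'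
-- itertools.combinations_with_replacement over the 4 pool INDICES (itertools works on
-- index tuples internally): lexicographic order, indices non-decreasing
def cwrI (st : Nat) : Nat → List (List Nat)
  | 0 => [[]]
  | r + 1 => (List.range' st (4 - st)).flatMap (fun k => (cwrI k r).map (fun t => k :: t))
-- it.combinations_with_replacement('ATGC', i): the index tuples mapped to pool characters
def pvCwr (i : Nat) : List (List Char) := (cwrI 0 i).map (fun t => t.map pvChr)

-- loop body; x models the remaining items of the chained iterator: the inner
-- 'for j in x' loop exhausts it, so x is empty at the end of each outer iteration
def bodyA (xy : List (List Char) × List String) (i : Int) : List (List Char) × List String :=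
  let x := xy.1 ++ pvCwr i.toNat
  (([] : List (List Char)), xy.2 ++ x.map (fun j => String.ofList j))  -- y.append(''.join(j))

def generate (l : Int) : List String :=
  ((PySem.List.pyRange 1 (l + 1) 1).foldl bodyA ([], [])).2

-- ===== PORT B =====
-- alpha[k]; every call site has 0 ≤ k < 4, where pyGet? is some
def alphaGet (k : Int) : Char := (PySem.Str.pyGet? "ATGC" k).getD 'A'

-- [(s + alpha[k], k) for s, start in prev for k in range(start, 4)]
def innerB (sp : String × Int) : List (String × Int) :=
  (PySem.List.pyRange sp.2 4 1).map (fun k => (sp.1 ++ String.singleton (alphaGet k), k))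

-- one pass of the outer loop over the state (res, prev)
def bodyB (rp : List String × List (String × Int)) (_ : Int) : List String × List (String × Int) :=
  let cur := rp.2.flatMap innerB
  (rp.1 ++ cur.map (fun t => t.1), cur)

def generate_alt (l : Int) : List String :=
  ((PySem.List.pyRange 0 l 1).foldl bodyB ([], [("", 0)])).1

-- ===== PRECONDITION & SPEC =====
def Spec_generate (l : Int) (out : List String) : Prop := out = generate_alt l
instance (l : Int) (out : List String) : Decidable (Spec_generate l out) := by unfold Spec_generate; infer_instance

-- ===== CLAIM (what is proved, stated in full; the proofs are below) =====
def Claim_equal_generate : Prop := ∀ (l : Int), Dom_generate l → Spec_generate l (generate l)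

-- ===== LEMMAS AND PROOFS =====

-- model of one B-extension step on index pairs (tuple, last index)
def extI (p : List Nat × Nat) : List (List Nat × Nat) :=
  (List.range' p.2 (4 - p.2)).map (fun k => (p.1 ++ [k], k))

-- B's level n of index pairs
def lvlI : Nat → List (List Nat × Nat)
  | 0 => [([], 0)]
  | n + 1 => (lvlI n).flatMap extI

-- B's pairs rendered as the port's (string, last index)
def thetaP (p : List Nat × Nat) : String × Int := (String.ofList (p.1.map pvChr), (p.2 : Int))
-- the string of a pair
def strOf (p : List Nat × Nat) : String := String.ofList (p.1.map pvChr)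

theorem getLastD_cons' (t : List Nat) (k st : Nat) :
    (k :: t).getLastD st = t.getLastD k := by
  cases t <;> simp [List.getLastD]

theorem getLastq_cons (t : List Nat) (k st : Nat) :
    (k :: t).getLast?.getD st = t.getLast?.getD k := by
  rw [← List.getLastD_eq_getLast?, ← List.getLastD_eq_getLast?]
  exact getLastD_cons' t k st

theorem ofList_push (cs : List Char) (c : Char) :
    String.ofList cs ++ String.singleton c = String.ofList (cs ++ [c]) := by
  apply String.ext; simp [String.singleton]

-- the heart: extending every length-r tuple (in order) by its admissible last indices
-- yields exactly the length-(r+1) combinations, in the same lexicographic order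
theorem cwrI_step : ∀ (r st : Nat),
    (cwrI st r).flatMap (fun t => extI (t, t.getLastD st))
      = (cwrI st (r + 1)).map (fun t => (t, t.getLastD st)) := by
  intro r
  induction r with
  | zero =>
      intro st
      have h : ∀ (xs : List Nat),
          xs.map (fun k => (([k] : List Nat), k))
            = (xs.flatMap (fun k => [[k]])).map (fun t : List Nat => (t, t.getLastD st)) := by
        intro xs
        induction xs with
        | nil => rfl
        | cons a as ih => simp [List.getLastD] at ih ⊢; exact ih
      simpa [cwrI, extI] using h (List.range' st (4 - st))
  | succ r ih =>
      intro st
      show ((List.range' st (4 - st)).flatMap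
              (fun k => (cwrI k r).map (fun t => k :: t))).flatMap
            (fun t => extI (t, t.getLastD st))
          = ((List.range' st (4 - st)).flatMap
              (fun k => (cwrI k (r + 1)).map (fun t => k :: t))).map
            (fun t => (t, t.getLastD st))
      rw [List.flatMap_assoc, List.map_flatMap]
      apply List.flatMap_congr
      intro k _
      rw [List.flatMap_map, List.map_map]
      have inner : ∀ t : List Nat,
          ((fun t => extI (t, t.getLastD st)) ∘ (fun t => k :: t)) t
            = (extI (t, t.getLastD k)).map (fun p => (k :: p.1, p.2)) := by
        intro t
        simp [Function.comp, extI, getLastq_cons, List.map_map]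
      calc (cwrI k r).flatMap ((fun t => extI (t, t.getLastD st)) ∘ (fun t => k :: t))
          = (cwrI k r).flatMap (fun t => (extI (t, t.getLastD k)).map (fun p => (k :: p.1, p.2))) := by
            exact List.flatMap_congr (fun t _ => inner t)
        _ = ((cwrI k r).flatMap (fun t => extI (t, t.getLastD k))).map (fun p => (k :: p.1, p.2)) := by
            rw [List.map_flatMap]
        _ = ((cwrI k (r + 1)).map (fun t => (t, t.getLastD k))).map (fun p => (k :: p.1, p.2)) := by
            rw [ih k]
        _ = (cwrI k (r + 1)).map ((fun t => (t, t.getLastD st)) ∘ fun t => k :: t) := by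
            rw [List.map_map]
            exact List.map_congr_left (fun t _ => by simp [Function.comp, getLastq_cons])

theorem lvlI_eq : ∀ n, lvlI n = (cwrI 0 n).map (fun t => (t, t.getLastD 0)) := by
  intro n
  induction n with
  | zero => rfl
  | succ n ih =>
      show (lvlI n).flatMap extI = _
      rw [ih, List.flatMap_map]
      exact cwrI_step n 0

theorem mem_cwrI_lt : ∀ (r st : Nat) (t : List Nat), t ∈ cwrI st r → ∀ k ∈ t, k < 4 := by
  intro r
  induction r with
  | zero => intro st t ht k hk; simp [cwrI] at ht; subst ht; simp at hk
  | succ r ih =>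
      intro st t ht k hk
      simp only [cwrI, List.mem_flatMap, List.mem_map] at ht
      obtain ⟨a, ha, u, hu, rfl⟩ := ht
      have ha4 : a < 4 := by
        have := List.mem_range'.1 ha
        omega
      rcases List.mem_cons.1 hk with rfl | hk
      · exact ha4
      · exact ih a u hu k hk

theorem lvlI_lt (n : Nat) (p : List Nat × Nat) (hp : p ∈ lvlI n) : p.2 < 4 := by
  rw [lvlI_eq] at hp
  obtain ⟨t, ht, rfl⟩ := List.mem_map.1 hp
  cases t with
  | nil => simp [List.getLastD]
  | cons a as =>
      have hm := List.getLast_mem (l := a :: as) (by simp)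
      have h4 := mem_cwrI_lt n 0 (a :: as) ht _ hm
      simpa [List.getLastD] using h4

theorem pyRange_st (st : Nat) (h : st < 4) :
    PySem.List.pyRange (st : Int) 4 1 = (List.range' st (4 - st)).map (fun k => Int.ofNat k) := by
  interval_cases st <;> decide

theorem alphaGet_eq (k : Nat) (h : k < 4) : alphaGet (Int.ofNat k) = pvChr k := by
  interval_cases k <;> decide

theorem innerB_eq (p : List Nat × Nat) (hp : p.2 < 4) :
    innerB (thetaP p) = (extI p).map thetaP := by
  show (PySem.List.pyRange ((p.2 : Nat) : Int) 4 1).map _ = _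
  rw [pyRange_st p.2 hp, List.map_map, extI, List.map_map]
  apply List.map_congr_left
  intro k hk
  have hk4 : k < 4 := by
    have := List.mem_range'.1 hk
    omega
  show ((thetaP p).1 ++ String.singleton (alphaGet (Int.ofNat k)), Int.ofNat k)
      = thetaP (p.1 ++ [k], k)
  rw [alphaGet_eq k hk4]
  simp only [thetaP]
  rw [ofList_push]
  simp

theorem curB_eq (P : List (List Nat × Nat)) (hP : ∀ p ∈ P, p.2 < 4) :
    (P.map thetaP).flatMap innerB = (P.flatMap extI).map thetaP := by
  rw [List.flatMap_map, List.map_flatMap]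
  apply List.flatMap_congr
  intro p hp
  exact innerB_eq p (hP p hp)

theorem loopB : ∀ (xs : List Int) (m : Nat) (res0 : List String),
    xs.foldl bodyB (res0, (lvlI m).map thetaP)
      = (res0 ++ (List.range xs.length).flatMap (fun j => (lvlI (m + j + 1)).map strOf),
         (lvlI (m + xs.length)).map thetaP) := by
  intro xs
  induction xs with
  | nil => intro m res0; simp
  | cons x xs ih =>
      intro m res0
      have hcur : ((lvlI m).map thetaP).flatMap innerB = (lvlI (m + 1)).map thetaP := by
        rw [curB_eq (lvlI m) (fun p hp => lvlI_lt m p hp)]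
        rfl
      have hbody : bodyB (res0, (lvlI m).map thetaP) x
          = (res0 ++ (lvlI (m + 1)).map strOf, (lvlI (m + 1)).map thetaP) := by
        unfold bodyB
        simp only [hcur, List.map_map]
        simp [thetaP, strOf, Function.comp]
      show xs.foldl bodyB (bodyB (res0, (lvlI m).map thetaP) x) = _
      rw [hbody, ih (m + 1)]
      have h2 : m + 1 + xs.length = m + (x :: xs).length := by simp; omega
      simp only [Prod.mk.injEq]
      refine ⟨?_, by rw [h2]⟩
      simp only [List.length_cons, List.range_succ_eq_map, List.flatMap_cons, List.flatMap_map,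
        List.append_assoc, Nat.add_zero]
      congr 1
      congr 1
      apply List.flatMap_congr
      intro j _
      have h3 : m + 1 + j + 1 = m + (j + 1) + 1 := by omega
      simp [h3]

theorem loopA : ∀ (xs : List Int) (y0 : List String),
    xs.foldl bodyA ([], y0)
      = ([], y0 ++ xs.flatMap (fun i => (pvCwr i.toNat).map (fun j => String.ofList j))) := by
  intro xs
  induction xs with
  | nil => intro y0; simp
  | cons x xs ih =>
      intro y0
      show xs.foldl bodyA (bodyA ([], y0) x) = _
      have : bodyA ([], y0) x = ([], y0 ++ (pvCwr x.toNat).map (fun j => String.ofList j)) := by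
        simp [bodyA]
      rw [this, ih]
      simp [List.flatMap_cons]

theorem level_strings (n : Nat) :
    (lvlI n).map strOf = (pvCwr n).map (fun j => String.ofList j) := by
  rw [lvlI_eq, List.map_map, pvCwr, List.map_map]
  rfl

-- ===== VERDICT (by name: the statement is the Claim_ definition above) =====
theorem generate_spec : Claim_equal_generate := by
  intro l _
  show generate l = generate_alt l
  rw [generate, generate_alt]
  have hB : (PySem.List.pyRange 0 l 1).foldl bodyB ([], [("", 0)])
      = (PySem.List.pyRange 0 l 1).foldl bodyB (([] : List String), (lvlI 0).map thetaP) := rfl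
  rw [hB, loopB, PySem.List.length_pyRange_one]
  rw [loopA]
  simp only [List.nil_append, Int.sub_zero]
  rw [PySem.List.pyRange_one]
  have : (l + 1 - 1 : Int) = l := by omega
  rw [this, List.flatMap_map]
  apply List.flatMap_congr
  intro k _
  rw [level_strings]
  have : ((1 : Int) + (k : Int)).toNat = 0 + k + 1 := by omega
  rw [this]
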